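-- pv_equiv track=rewrite | github.com/alexmocanu07/FII-CN | tema1.py | split_by_columns
-- ===== SOURCE A (Python) =====
-- def split_by_columns(A, n, logn):
--     output = list()
--     for i in range(0, logn):
--         A_i = list()
--         for j in range(0,n):
--             A_i.append(A[j][i*logn:(i+1)*logn])
--         output.append(A_i)
--     return output
-- ===== SOURCE B (Python) =====
-- def split_by_columns(A, n, logn):
--     if logn <= 0:
--         return []
--     # slice each row into its logn chunks first (row-major), then transpose
--     rows_major = [[A[j][i*logn:(i+1)*logn] for i in range(logn)] for j in range(n)]
--     output = []
--     for i in range(logn):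
--         output.append([rows_major[j][i] for j in range(n)])
--     return output
-- ===== Notes on version B (the rewrite author's own statement) =====
-- stated objective: alternative
-- what changed: B slices every row into its logn chunks in one row-major pass and then transposes that table into column-major order, instead of assembling each column block directly with nested loops over (i, j).
import Mathlib
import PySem

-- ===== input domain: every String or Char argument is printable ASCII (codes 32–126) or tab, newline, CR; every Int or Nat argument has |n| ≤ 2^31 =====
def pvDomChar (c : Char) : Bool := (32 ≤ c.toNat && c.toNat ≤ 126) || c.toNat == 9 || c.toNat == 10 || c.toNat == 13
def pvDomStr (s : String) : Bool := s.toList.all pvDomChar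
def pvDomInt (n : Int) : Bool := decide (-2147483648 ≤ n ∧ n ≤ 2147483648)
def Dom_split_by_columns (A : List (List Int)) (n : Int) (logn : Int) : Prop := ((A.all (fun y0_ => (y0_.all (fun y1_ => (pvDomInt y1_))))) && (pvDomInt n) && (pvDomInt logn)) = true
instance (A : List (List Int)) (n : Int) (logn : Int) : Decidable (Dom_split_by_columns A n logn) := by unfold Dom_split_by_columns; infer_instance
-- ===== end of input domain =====

-- B slices every row into its logn chunks in one row-major pass, then transposes
-- that table into the column-major result (alternative decomposition, same cost).

-- ===== PORT A =====
def split_by_columns (A : List (List Int)) (n : Int) (logn : Int) : List (List (List Int)) :=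
  (PySem.List.pyRange 0 logn 1).foldl (fun output i =>
    output ++ [(PySem.List.pyRange 0 n 1).foldl (fun A_i j =>
      A_i ++ [PySem.List.slice (PySem.List.pyGetD A j []) (some (i * logn)) (some ((i + 1) * logn))]) []]) []

-- ===== PORT B =====
def split_by_columns_alt (A : List (List Int)) (n : Int) (logn : Int) : List (List (List Int)) :=
  if logn ≤ 0 then [] else
  let rowsMajor : List (List (List Int)) :=
    (PySem.List.pyRange 0 n 1).map (fun j =>
      (PySem.List.pyRange 0 logn 1).map (fun i =>
        PySem.List.slice (PySem.List.pyGetD A j []) (some (i * logn)) (some ((i + 1) * logn))))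
  (PySem.List.pyRange 0 logn 1).map (fun i =>
    (PySem.List.pyRange 0 n 1).map (fun j =>
      PySem.List.pyGetD (PySem.List.pyGetD rowsMajor j []) i []))

-- ===== PRECONDITION & SPEC =====
-- Python A raises IndexError on A[j] when the outer loop runs (0 < logn) and some j < n is past the end of A.
def Pre_split_by_columns (A : List (List Int)) (n : Int) (logn : Int) : Prop :=
  0 < logn → n ≤ (A.length : Int)
instance (A : List (List Int)) (n : Int) (logn : Int) : Decidable (Pre_split_by_columns A n logn) := by unfold Pre_split_by_columns; infer_instance

def pvWitness_split_by_columns : List (List Int) × Int × Int := ([[1, 2, 3, 4], [5, 6, 7, 8]], 2, 2)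

def Spec_split_by_columns (A : List (List Int)) (n : Int) (logn : Int) (out : List (List (List Int))) : Prop := out = split_by_columns_alt A n logn
instance (A : List (List Int)) (n : Int) (logn : Int) (out : List (List (List Int))) : Decidable (Spec_split_by_columns A n logn out) := by unfold Spec_split_by_columns; infer_instance

-- ===== CLAIM (what is proved, stated in full; the proofs are below) =====
def Claim_equal_split_by_columns : Prop := ∀ (A : List (List Int)) (n : Int) (logn : Int), Dom_split_by_columns A n logn → Pre_split_by_columns A n logn → Spec_split_by_columns A n logn (split_by_columns A n logn)

-- ===== LEMMAS AND PROOFS =====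

-- Both ports equal the same map-of-maps normal form.
theorem split_by_columns_eq_alt (A : List (List Int)) (n logn : Int) :
    split_by_columns A n logn = split_by_columns_alt A n logn := by
  unfold split_by_columns split_by_columns_alt
  by_cases h : logn ≤ 0
  · simp [h, PySem.List.pyRange_one_eq_nil (by omega : logn ≤ (0:Int))]
  · rw [if_neg h]
    rw [PySem.List.foldl_append_singleton_eq_map]
    refine List.map_congr_left (fun i hi => ?_)
    rw [PySem.List.foldl_append_singleton_eq_map]
    refine List.map_congr_left (fun j hj => ?_)
    rw [PySem.List.mem_pyRange_one] at hi hj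
    rw [PySem.List.pyGetD_map_pyRange_of_nonneg _ _ _ _ hj.1 hj.2,
        PySem.List.pyGetD_map_pyRange_of_nonneg _ _ _ _ hi.1 hi.2]

-- ===== VERDICT (by name: the statement is the Claim_ definition above) =====
theorem split_by_columns_spec : Claim_equal_split_by_columns := by
  intro A n logn _ _
  exact split_by_columns_eq_alt A n logn
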